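-- pv_equiv track=rewrite | github.com/eidelen/6Nimmt | env/common.py | nbr_cards_between
-- ===== SOURCE A (Python) =====
-- def nbr_cards_between(a: int, b: int, exclude_known_cards = {}) -> int:
--
--     if a == b or a > b:
--         return -1 # invaldi
--
--     cnt_cards = 0
--     for i in range(a+1, b):
--         if i not in exclude_known_cards:
--             cnt_cards += 1
--
--     return cnt_cards
-- ===== SOURCE B (Python) =====
-- def nbr_cards_between(a: int, b: int, exclude_known_cards = {}) -> int:
--     if a >= b:
--         return -1
--     hits = len({e for e in exclude_known_cards if a < e < b})
--     return (b - a - 1) - hits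
-- ===== Notes on version B (the rewrite author's own statement) =====
-- stated objective: simpler
-- what changed: Replaces the per-integer loop over range(a+1,b) with the closed form b-a-1 minus the number of distinct excluded cards strictly between a and b, iterating only over the exclusions.
import Mathlib
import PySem

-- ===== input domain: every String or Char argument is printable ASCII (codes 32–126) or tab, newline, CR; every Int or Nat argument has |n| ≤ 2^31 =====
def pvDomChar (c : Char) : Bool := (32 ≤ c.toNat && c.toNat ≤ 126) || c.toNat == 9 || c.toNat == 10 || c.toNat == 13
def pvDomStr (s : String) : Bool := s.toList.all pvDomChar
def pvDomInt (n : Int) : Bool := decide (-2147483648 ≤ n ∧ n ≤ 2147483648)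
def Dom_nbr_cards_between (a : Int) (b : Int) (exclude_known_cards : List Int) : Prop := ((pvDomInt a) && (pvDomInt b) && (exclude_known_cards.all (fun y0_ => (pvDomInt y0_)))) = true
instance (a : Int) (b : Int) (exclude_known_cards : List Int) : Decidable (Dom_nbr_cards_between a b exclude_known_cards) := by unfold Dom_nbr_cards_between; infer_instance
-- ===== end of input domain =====

-- B replaces the O(b-a) loop by the closed form b-a-1 minus the count of distinct excluded cards in (a,b).
-- ===== PORT A =====
def nbr_cards_between (a : Int) (b : Int) (exclude_known_cards : List Int) : Int :=
  if a = b ∨ a > b then -1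
  else (PySem.List.pyRange (a + 1) b 1).foldl
    (fun cnt_cards i => if i ∈ exclude_known_cards then cnt_cards else cnt_cards + 1) 0

-- ===== PORT B =====
def nbr_cards_between_alt (a : Int) (b : Int) (exclude_known_cards : List Int) : Int :=
  if a ≥ b then -1
  else
    let hits : Int :=
      PySem.Set.len (PySem.Set.ofList (exclude_known_cards.filter (fun e => a < e && e < b)))
    (b - a - 1) - hits

-- ===== PRECONDITION & SPEC =====
def Spec_nbr_cards_between (a : Int) (b : Int) (exclude_known_cards : List Int) (out : Int) : Prop := out = nbr_cards_between_alt a b exclude_known_cards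
instance (a : Int) (b : Int) (exclude_known_cards : List Int) (out : Int) : Decidable (Spec_nbr_cards_between a b exclude_known_cards out) := by unfold Spec_nbr_cards_between; infer_instance

-- ===== CLAIM (what is proved, stated in full; the proofs are below) =====
def Claim_equal_nbr_cards_between : Prop := ∀ (a : Int) (b : Int) (exclude_known_cards : List Int), Dom_nbr_cards_between a b exclude_known_cards → Spec_nbr_cards_between a b exclude_known_cards (nbr_cards_between a b exclude_known_cards)

-- ===== LEMMAS AND PROOFS =====

theorem foldl_count_not_mem (ex l : List Int) (c : Int) :
    l.foldl (fun cnt i => if i ∈ ex then cnt else cnt + 1) c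
      = c + (l.countP (fun i => !decide (i ∈ ex)) : Int) := by
  induction l generalizing c with
  | nil => simp
  | cons x xs ih =>
    simp only [List.foldl_cons, List.countP_cons, ih]
    by_cases hx : x ∈ ex
    · simp [hx]
    · simp [hx]
      omega

theorem countP_mem_eq_setlen (R ex : List Int) (hR : R.Nodup) (p : Int → Bool)
    (hp : ∀ x, p x = true ↔ x ∈ R) :
    R.countP (fun i => decide (i ∈ ex))
      = (PySem.Set.ofList (ex.filter p)).length := by
  rw [List.countP_eq_length_filter]
  have h1 : (R.filter (fun i => decide (i ∈ ex))).Nodup := hR.filter _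
  have h2 : (PySem.Set.ofList (ex.filter p)).Nodup := PySem.Set.nodup_ofList _
  rw [← List.toFinset_card_of_nodup h1, ← List.toFinset_card_of_nodup h2]
  congr 1
  ext x
  simp only [List.mem_toFinset, List.mem_filter, PySem.Set.mem_ofList]
  constructor
  · rintro ⟨hxR, hxex⟩; exact ⟨by simpa using hxex, (hp x).2 hxR⟩
  · rintro ⟨hxex, hpx⟩; exact ⟨(hp x).1 hpx, by simpa using hxex⟩

-- ===== VERDICT (by name: the statement is the Claim_ definition above) =====
theorem nbr_cards_between_spec : Claim_equal_nbr_cards_between := by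
  intro a b ex _
  unfold Spec_nbr_cards_between nbr_cards_between nbr_cards_between_alt
  by_cases hab : a ≥ b
  · have : a = b ∨ a > b := by omega
    simp [hab, this]
  · have hlt : a < b := by omega
    have hne : ¬ (a = b ∨ a > b) := by omega
    simp only [if_neg hne, if_neg hab]
    rw [foldl_count_not_mem]
    have hnodup := PySem.List.nodup_pyRange_one (a := a + 1) (b := b)
    have hcnt := countP_mem_eq_setlen (PySem.List.pyRange (a + 1) b 1) ex hnodup
        (fun e => a < e && e < b)
        (by intro x
            simp only [PySem.List.mem_pyRange_one, Bool.and_eq_true, decide_eq_true_eq]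
            omega)
    have hlen : (PySem.List.pyRange (a + 1) b 1).length = (b - a - 1).toNat := by
      rw [PySem.List.length_pyRange_one]; congr 1; omega
    have hsplit : (PySem.List.pyRange (a + 1) b 1).countP (fun i => !decide (i ∈ ex))
        + (PySem.List.pyRange (a + 1) b 1).countP (fun i => decide (i ∈ ex))
        = (PySem.List.pyRange (a + 1) b 1).length := by
      have hperm := (List.filter_append_perm (fun i => !decide (i ∈ ex))
        (PySem.List.pyRange (a + 1) b 1)).length_eq
      simp only [List.length_append, List.countP_eq_length_filter, Bool.not_not] at hperm ⊢
      simpa using hperm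
    simp only [PySem.Set.len] at *
    omega
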